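-- pv_equiv track=rewrite | github.com/dipta007/SemEval24-Task8 | src/contrastive/data_process_batch.py | get_paraphase_whole
-- ===== SOURCE A (Python) =====
-- def get_paraphase_whole(paragraph, real2para):
--     paraphase = []
--     paragraph = paragraph.replace("\n", " \n")
--     for line in paragraph.split(". "):
--         curr_real = line.split("\n")
--         now_paraphase = [real2para[x.strip()] for x in curr_real]
--
--         paraphase.append("\n".join(now_paraphase))
--
--     paraphase = ". ".join(paraphase)
--     return paraphase
-- ===== SOURCE B (Python) =====
-- def get_paraphase_whole(paragraph, real2para):
--     paragraph = paragraph.replace("\n", " \n")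
--     out = []
--     tok = []
--     i = 0
--     n = len(paragraph)
--     while i < n:
--         c = paragraph[i]
--         if c == '\n':
--             out.append(real2para[''.join(tok).strip()])
--             out.append('\n')
--             tok = []
--             i += 1
--         elif c == '.' and i + 1 < n and paragraph[i + 1] == ' ':
--             out.append(real2para[''.join(tok).strip()])
--             out.append('. ')
--             tok = []
--             i += 2
--         else:
--             tok.append(c)
--             i += 1
--     out.append(real2para[''.join(tok).strip()])
--     return ''.join(out)
-- ===== Notes on version B (the rewrite author's own statement) =====
-- stated objective: alternative
-- what changed: A tokenizes with two nested split('. ')/split('\n') passes, maps tokens through the dict and reassembles with join/join; B makes a single left-to-right character scan with a token accumulator, emitting each delimiter and each looked-up token as it is found.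
import Mathlib
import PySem

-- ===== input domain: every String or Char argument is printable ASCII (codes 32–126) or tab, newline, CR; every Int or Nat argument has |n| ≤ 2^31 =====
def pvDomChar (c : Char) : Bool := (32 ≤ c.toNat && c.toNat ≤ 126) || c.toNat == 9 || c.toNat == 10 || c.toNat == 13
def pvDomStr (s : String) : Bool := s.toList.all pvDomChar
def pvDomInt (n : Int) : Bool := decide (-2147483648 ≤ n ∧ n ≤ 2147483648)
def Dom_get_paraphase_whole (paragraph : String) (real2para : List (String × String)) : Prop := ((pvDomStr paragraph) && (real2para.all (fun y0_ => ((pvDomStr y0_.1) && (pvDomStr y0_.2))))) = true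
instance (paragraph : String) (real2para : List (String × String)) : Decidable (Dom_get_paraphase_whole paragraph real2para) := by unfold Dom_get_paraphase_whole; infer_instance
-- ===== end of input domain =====

-- B replaces A's two-level split(". ")/split("\n") + join/join with a single left-to-right
-- character scan that emits each delimiter and each looked-up token as it is found (objective:
-- alternative — one flat pass instead of split/rejoin; same asymptotic cost).

-- real2para[x.strip()], shared by both ports (both Pythons perform exactly this lookup);
-- PySem.Dict.getD with default "" stands for dict subscription: Pre_ guarantees the key is present.
def pvLookup (d : List (String × String)) (tok : List Char) : List Char :=
  (PySem.Dict.getD (PySem.Dict.mk d) (String.ofList (PySem.Chars.strip tok)) "").toList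

-- ===== PORT A =====
def get_paraphase_whole (paragraph : String) (real2para : List (String × String)) : String :=
  let p := PySem.Str.replace paragraph "\n" " \n"
  let paraphase := (PySem.Chars.splitOn p.toList ['.', ' ']).map (fun line =>
      PySem.Chars.join ['\n'] ((PySem.Chars.splitOn line ['\n']).map (fun x => pvLookup real2para x)))
  String.ofList (PySem.Chars.join ['.', ' '] paraphase)

-- ===== PORT B =====
-- the while-loop of Source B: cs = remaining characters, tok = current token accumulator
def pvScan (d : List (String × String)) : List Char → List Char → List Char
  | [], tok => pvLookup d tok
  | c :: rest, tok =>
    if c = '\n' then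
      pvLookup d tok ++ '\n' :: pvScan d rest []
    else if c = '.' ∧ rest.head? = some ' ' then
      pvLookup d tok ++ '.' :: ' ' :: pvScan d rest.tail []
    else
      pvScan d rest (tok ++ [c])
termination_by cs _ => cs.length
decreasing_by
  · simp
  · cases rest <;> simp
  · simp

def get_paraphase_whole_alt (paragraph : String) (real2para : List (String × String)) : String :=
  String.ofList (pvScan real2para (PySem.Str.replace paragraph "\n" " \n").toList [])

-- ===== PRECONDITION & SPEC =====
-- Pre_ excludes exactly the inputs on which Python A raises KeyError: some token of the
-- tokenization, stripped, is not a key of real2para.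
def Pre_get_paraphase_whole (paragraph : String) (real2para : List (String × String)) : Prop :=
  ∀ line ∈ PySem.Chars.splitOn (PySem.Str.replace paragraph "\n" " \n").toList ['.', ' '],
    ∀ x ∈ PySem.Chars.splitOn line ['\n'],
      PySem.Dict.contains (PySem.Dict.mk real2para) (String.ofList (PySem.Chars.strip x)) = true
instance (paragraph : String) (real2para : List (String × String)) : Decidable (Pre_get_paraphase_whole paragraph real2para) := by unfold Pre_get_paraphase_whole; infer_instance

def pvWitness_get_paraphase_whole : String × (List (String × String)) :=
  ("hello world. bye\nnow", [("hello world", "hi earth"), ("bye", "farewell"), ("now", "at once")])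

def Spec_get_paraphase_whole (paragraph : String) (real2para : List (String × String)) (out : String) : Prop := out = get_paraphase_whole_alt paragraph real2para
instance (paragraph : String) (real2para : List (String × String)) (out : String) : Decidable (Spec_get_paraphase_whole paragraph real2para out) := by unfold Spec_get_paraphase_whole; infer_instance

-- ===== CLAIM (what is proved, stated in full; the proofs are below) =====
def Claim_equal_get_paraphase_whole : Prop := ∀ (paragraph : String) (real2para : List (String × String)), Dom_get_paraphase_whole paragraph real2para → Pre_get_paraphase_whole paragraph real2para → Spec_get_paraphase_whole paragraph real2para (get_paraphase_whole paragraph real2para)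

-- ===== LEMMAS AND PROOFS =====

-- the inner "\n".join of looked-up tokens of one ". "-piece (the loop body of A)
def pvInner (d : List (String × String)) (line : List Char) : List Char :=
  PySem.Chars.join ['\n'] ((PySem.Chars.splitOn line ['\n']).map (fun x => pvLookup d x))

-- A's core computation on a character list (what port A does after the replace)
def pvACore (d : List (String × String)) (cs : List Char) : List Char :=
  PySem.Chars.join ['.', ' '] ((PySem.Chars.splitOn cs ['.', ' ']).map (pvInner d))

-- ---- infrastructure about PySem.Chars.splitOn.go ----

-- unfolding equations of PySem.Chars.splitOn.go in usable form
lemma go_zero (sep : List Char) (l cur : List Char) (acc : List (List Char)) :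
    PySem.Chars.splitOn.go sep 0 l cur acc = ((cur.reverse ++ l) :: acc).reverse := by
  rw [PySem.Chars.splitOn.go]

lemma go_nil (sep : List Char) (f : Nat) (cur : List Char) (acc : List (List Char)) :
    PySem.Chars.splitOn.go sep (f + 1) [] cur acc = (cur.reverse :: acc).reverse := by
  rw [PySem.Chars.splitOn.go]; omega

lemma go_cons (sep : List Char) (f : Nat) (c : Char) (rest cur : List Char) (acc : List (List Char)) :
    PySem.Chars.splitOn.go sep (f + 1) (c :: rest) cur acc =
      if sep.isPrefixOf (c :: rest) then
        PySem.Chars.splitOn.go sep f (List.drop sep.length (c :: rest)) [] (cur.reverse :: acc)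
      else PySem.Chars.splitOn.go sep f rest (c :: cur) acc := by
  rw [PySem.Chars.splitOn.go]

lemma go_acc (sep : List Char) (fuel : Nat) (l cur : List Char) (acc : List (List Char)) :
    PySem.Chars.splitOn.go sep fuel l cur acc
      = acc.reverse ++ PySem.Chars.splitOn.go sep fuel l cur [] := by
  induction fuel generalizing l cur acc with
  | zero => simp [go_zero]
  | succ f ih =>
    cases l with
    | nil => simp [go_nil]
    | cons c rest =>
      rw [go_cons, go_cons]
      split
      · rw [ih _ _ (cur.reverse :: acc), ih _ _ [cur.reverse]]
        simp
      · exact ih _ _ _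

lemma go_fuel (sep : List Char) (hsep : sep ≠ []) :
    ∀ fuel (l : List Char), l.length < fuel → ∀ (cur : List Char) (acc : List (List Char)),
      PySem.Chars.splitOn.go sep fuel l cur acc
        = PySem.Chars.splitOn.go sep (l.length + 1) l cur acc := by
  intro fuel
  induction fuel using Nat.strong_induction_on with
  | _ fuel ih =>
    intro l h cur acc
    have hsl : 1 ≤ sep.length := by
      cases sep with
      | nil => exact absurd rfl hsep
      | cons _ _ => simp
    cases fuel with
    | zero => omega
    | succ f =>
      cases l with
      | nil => rw [go_nil, go_nil]
      | cons c rest =>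
        rw [go_cons]
        simp only [List.length_cons]
        rw [go_cons]
        split
        · rw [ih f (by omega) _ (by simp at h ⊢; omega),
              ih (rest.length + 1) (by simp at h; omega) _ (by simp; omega)]
        · rw [ih f (by omega) rest (by simp at h; omega),
              ih (rest.length + 1) (by simp at h; omega) rest (by omega)]

lemma go_ne_nil (sep : List Char) (fuel : Nat) (l cur : List Char) (acc : List (List Char)) :
    PySem.Chars.splitOn.go sep fuel l cur acc ≠ [] := by
  induction fuel generalizing l cur acc with
  | zero => simp [go_zero]
  | succ f ih =>
    cases l with
    | nil => simp [go_nil]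
    | cons c rest =>
      rw [go_cons]
      split
      · exact ih _ _ _
      · exact ih _ _ _

lemma go_cur (sep : List Char) :
    ∀ (fuel : Nat) (l cur : List Char),
      PySem.Chars.splitOn.go sep fuel l cur []
        = (cur.reverse ++ (PySem.Chars.splitOn.go sep fuel l [] []).headI)
            :: (PySem.Chars.splitOn.go sep fuel l [] []).tail := by
  intro fuel
  induction fuel with
  | zero => intro l cur; simp [go_zero]
  | succ f ih =>
    intro l cur
    cases l with
    | nil => simp [go_nil]
    | cons c rest =>
      rw [go_cons, go_cons]
      split
      · rw [go_acc _ _ _ _ [cur.reverse], go_acc _ _ _ _ [List.reverse []]]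
        simp
      · rw [ih rest (c :: cur), ih rest [c]]
        simp

lemma go_nosep (sep : List Char) :
    ∀ (fuel : Nat) (l : List Char), l.length < fuel → ¬ sep <:+: l → ∀ (cur : List Char) (acc : List (List Char)),
      PySem.Chars.splitOn.go sep fuel l cur acc = ((cur.reverse ++ l) :: acc).reverse := by
  intro fuel
  induction fuel with
  | zero => intro l h; omega
  | succ f ih =>
    intro l h hinf cur acc
    cases l with
    | nil => simp [go_nil]
    | cons c rest =>
      rw [go_cons]
      have hpre : sep.isPrefixOf (c :: rest) = false := by
        by_contra hp
        simp only [Bool.not_eq_false, List.isPrefixOf_iff_prefix] at hp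
        exact hinf hp.isInfix
      rw [hpre]
      simp only [Bool.false_eq_true, if_false]
      have : ¬ sep <:+: rest := fun hs => hinf (List.infix_cons hs)
      rw [ih rest (by simp at h; omega) this (c :: cur) acc]
      simp

-- splitOn-level facts
lemma splitOn_ne_nil (cs sep : List Char) : PySem.Chars.splitOn cs sep ≠ [] := by
  unfold PySem.Chars.splitOn; exact go_ne_nil _ _ _ _ _

lemma splitOn_no (cs sep : List Char) (h : ¬ sep <:+: cs) :
    PySem.Chars.splitOn cs sep = [cs] := by
  unfold PySem.Chars.splitOn
  rw [go_nosep sep _ cs (by omega) h]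
  simp

lemma go_pre_nl :
    ∀ (x : List Char), '\n' ∉ x → ∀ (fuel : Nat) (y cur : List Char),
      x.length + 1 + y.length < fuel →
      PySem.Chars.splitOn.go ['\n'] fuel (x ++ '\n' :: y) cur []
        = (cur.reverse ++ x) :: PySem.Chars.splitOn.go ['\n'] (y.length + 1) y [] [] := by
  intro x
  induction x with
  | nil =>
    intro _ fuel y cur hf
    cases fuel with
    | zero => omega
    | succ f =>
      simp only [List.nil_append]
      rw [go_cons]
      have hpre : (['\n'] : List Char).isPrefixOf ('\n' :: y) = true := by
        simp [List.isPrefixOf]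
      rw [hpre]
      simp only [if_true]
      rw [go_acc, go_fuel ['\n'] (by simp) f _ (by simp at hf ⊢; omega)]
      simp
  | cons c x' ih =>
    intro h fuel y cur hf
    have hc : c ≠ '\n' := fun e => h (by simp [e])
    cases fuel with
    | zero => omega
    | succ f =>
      rw [List.cons_append, go_cons]
      have hpre : (['\n'] : List Char).isPrefixOf (c :: (x' ++ '\n' :: y)) = false := by
        simp [List.isPrefixOf]
        exact fun e => absurd e.symm hc
      rw [hpre]
      simp only [Bool.false_eq_true, if_false]
      rw [ih (fun hm => h (List.mem_cons_of_mem _ hm)) f y (c :: cur) (by simp at hf ⊢; omega)]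
      simp

lemma splitOn_nl (x y : List Char) (h : '\n' ∉ x) :
    PySem.Chars.splitOn (x ++ '\n' :: y) ['\n'] = x :: PySem.Chars.splitOn y ['\n'] := by
  unfold PySem.Chars.splitOn
  rw [go_pre_nl x h _ y [] (by simp; omega)]
  simp

lemma go_pre_dot :
    ∀ (x : List Char), ¬ ['.', ' '] <:+: x → ∀ (fuel : Nat) (y cur : List Char),
      x.length + 2 + y.length < fuel →
      PySem.Chars.splitOn.go ['.', ' '] fuel (x ++ '.' :: ' ' :: y) cur []
        = (cur.reverse ++ x) :: PySem.Chars.splitOn.go ['.', ' '] (y.length + 1) y [] [] := by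
  intro x
  induction x with
  | nil =>
    intro _ fuel y cur hf
    cases fuel with
    | zero => omega
    | succ f =>
      simp only [List.nil_append]
      rw [go_cons]
      have hpre : (['.', ' '] : List Char).isPrefixOf ('.' :: ' ' :: y) = true := by
        simp [List.isPrefixOf]
      rw [hpre]
      simp only [if_true]
      rw [go_acc, go_fuel ['.', ' '] (by simp) f _ (by simp at hf ⊢; omega)]
      simp
  | cons c x' ih =>
    intro h fuel y cur hf
    cases fuel with
    | zero => omega
    | succ f =>
      rw [List.cons_append, go_cons]
      have hpre : (['.', ' '] : List Char).isPrefixOf (c :: (x' ++ '.' :: ' ' :: y)) = false := by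
        cases x' with
        | nil => simp [List.isPrefixOf]
        | cons d x'' =>
          by_cases hcd : c = '.' ∧ d = ' '
          · exact absurd ⟨[], x'', by simp [hcd.1, hcd.2]⟩ h
          · simp only [List.cons_append, List.isPrefixOf]
            rcases (not_and_or.mp hcd) with hc | hd
            · simp [Ne.symm hc]
            · simp [Ne.symm hd]
      rw [hpre]
      simp only [Bool.false_eq_true, if_false]
      rw [ih (fun hm => h (List.infix_cons hm)) f y (c :: cur) (by simp at hf ⊢; omega)]
      simp

lemma splitOn_dot (x y : List Char) (h : ¬ ['.', ' '] <:+: x) :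
    PySem.Chars.splitOn (x ++ '.' :: ' ' :: y) ['.', ' '] = x :: PySem.Chars.splitOn y ['.', ' '] := by
  unfold PySem.Chars.splitOn
  rw [go_pre_dot x h _ y [] (by simp; omega)]
  simp

-- infix into a list extended by one char on the right, two-char needle
lemma infix_concat_two {a b c : Char} {tok : List Char} (h : [a, b] <:+: tok ++ [c]) :
    [a, b] <:+: tok ∨ (tok.getLast? = some a ∧ c = b) := by
  obtain ⟨s, t, heq⟩ := h
  rcases List.eq_nil_or_concat t with rfl | ⟨t', d, rfl⟩
  · have heq' : (s ++ [a]) ++ [b] = tok ++ [c] := by simpa [List.append_assoc] using heq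
    obtain ⟨h1, h2⟩ := List.append_inj' heq' (by simp)
    right
    refine ⟨?_, by simpa using h2.symm⟩
    rw [← h1, List.getLast?_concat]
  · have heq' : (s ++ [a, b] ++ t') ++ [d] = tok ++ [c] := by simpa [List.append_assoc] using heq
    obtain ⟨h1, _⟩ := List.append_inj' heq' (by simp)
    exact Or.inl ⟨s, t', h1⟩

lemma go_prepend_dot :
    ∀ (u : List Char), ¬ ['.', ' '] <:+: u →
      ∀ (cs : List Char), (u.getLast? = some '.' → cs.head? ≠ some ' ') →
      ∀ (fuel : Nat) (cur : List Char) (acc : List (List Char)), (u ++ cs).length < fuel →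
      PySem.Chars.splitOn.go ['.', ' '] fuel (u ++ cs) cur acc
        = PySem.Chars.splitOn.go ['.', ' '] (cs.length + 1) cs (u.reverse ++ cur) acc := by
  intro u
  induction u with
  | nil =>
    intro _ cs hb fuel cur acc hf
    simp only [List.nil_append, List.reverse_nil]
    exact go_fuel ['.', ' '] (by simp) fuel cs (by simpa using hf) cur acc
  | cons c u' ih =>
    intro hu cs hb fuel cur acc hf
    cases fuel with
    | zero => omega
    | succ f =>
      rw [List.cons_append, go_cons]
      have hpre : (['.', ' '] : List Char).isPrefixOf (c :: (u' ++ cs)) = false := by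
        cases u' with
        | nil =>
          by_cases hc : c = '.'
          · subst hc
            have hcs := hb (by simp)
            cases cs with
            | nil => simp [List.isPrefixOf]
            | cons e cs' =>
              simp only [List.nil_append, List.isPrefixOf, Bool.and_eq_false_iff]
              right
              simp at hcs
              simp [Ne.symm hcs]
          · simp [List.isPrefixOf, Ne.symm hc]
        | cons d u'' =>
          by_cases hcd : c = '.' ∧ d = ' '
          · exact absurd ⟨[], u'', by simp [hcd.1, hcd.2]⟩ hu
          · simp only [List.cons_append, List.isPrefixOf]
            rcases (not_and_or.mp hcd) with hc | hd
            · simp [Ne.symm hc]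
            · simp [Ne.symm hd]
      rw [hpre]
      simp only [Bool.false_eq_true, if_false]
      have hu'' : ¬ ['.', ' '] <:+: u' := fun hm => hu (List.infix_cons hm)
      have hb' : u'.getLast? = some '.' → cs.head? ≠ some ' ' := by
        intro hl
        cases u' with
        | nil => simp at hl
        | cons d u'' => exact hb (by rw [List.getLast?_cons_cons]; exact hl)
      rw [ih hu'' cs hb' f (c :: cur) acc (by simp at hf ⊢; omega)]
      simp

lemma splitOn_prepend_dot (u cs : List Char) (hu : ¬ ['.', ' '] <:+: u)
    (hb : u.getLast? = some '.' → cs.head? ≠ some ' ') :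
    PySem.Chars.splitOn (u ++ cs) ['.', ' ']
      = (u ++ (PySem.Chars.splitOn cs ['.', ' ']).headI)
          :: (PySem.Chars.splitOn cs ['.', ' ']).tail := by
  unfold PySem.Chars.splitOn
  rw [go_prepend_dot u hu cs hb _ [] [] (by omega)]
  rw [go_cur]
  simp

-- join helpers
lemma join_head_append (sep a b : List Char) (t : List (List Char)) :
    PySem.Chars.join sep ((a ++ b) :: t) = a ++ PySem.Chars.join sep (b :: t) := by
  cases t with
  | nil => simp [PySem.Chars.join_singleton]
  | cons h t => rw [PySem.Chars.join_cons_cons, PySem.Chars.join_cons_cons]; simp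

-- ---- structure of A's core ----

lemma inner_tok (d : List (String × String)) (tok : List Char) (h : '\n' ∉ tok) :
    pvInner d tok = pvLookup d tok := by
  unfold pvInner
  rw [splitOn_no tok ['\n'] (fun hin => h ((List.singleton_infix_iff _ _).mp hin))]
  simp [PySem.Chars.join_singleton]

lemma inner_nl (d : List (String × String)) (tok r0 : List Char) (h : '\n' ∉ tok) :
    pvInner d (tok ++ '\n' :: r0) = pvLookup d tok ++ '\n' :: pvInner d r0 := by
  unfold pvInner
  rw [splitOn_nl tok r0 h]
  rcases hk : PySem.Chars.splitOn r0 ['\n'] with _ | ⟨k0, ks⟩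
  · exact absurd hk (splitOn_ne_nil _ _)
  · simp only [List.map_cons]
    rw [PySem.Chars.join_cons_cons]
    simp

lemma acore_tok (d : List (String × String)) (tok : List Char)
    (h1 : ¬ ['.', ' '] <:+: tok) (h2 : '\n' ∉ tok) :
    pvACore d tok = pvLookup d tok := by
  unfold pvACore
  rw [splitOn_no tok _ h1]
  simp only [List.map_cons, List.map_nil]
  rw [PySem.Chars.join_singleton]
  exact inner_tok d tok h2

lemma acore_nl (d : List (String × String)) (tok rest : List Char)
    (h1 : ¬ ['.', ' '] <:+: tok) (h2 : '\n' ∉ tok) :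
    pvACore d (tok ++ '\n' :: rest) = pvLookup d tok ++ '\n' :: pvACore d rest := by
  unfold pvACore
  have h1' : ¬ ['.', ' '] <:+: tok ++ ['\n'] := by
    intro hin
    rcases infix_concat_two hin with h' | ⟨_, h2'⟩
    · exact h1 h'
    · exact absurd h2' (by decide)
  have hbnd : (tok ++ ['\n']).getLast? = some '.' → rest.head? ≠ some ' ' := by
    intro hl
    rw [List.getLast?_concat] at hl
    simp at hl
  have hrw : tok ++ '\n' :: rest = (tok ++ ['\n']) ++ rest := by simp
  rw [hrw, splitOn_prepend_dot _ _ h1' hbnd]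
  rcases hr : PySem.Chars.splitOn rest ['.', ' '] with _ | ⟨r0, rs⟩
  · exact absurd hr (splitOn_ne_nil _ _)
  · simp only [List.headI, List.tail_cons, List.map_cons]
    have e1 : (tok ++ ['\n']) ++ r0 = tok ++ '\n' :: r0 := by simp
    rw [e1, inner_nl d tok r0 h2]
    have e2 : pvLookup d tok ++ '\n' :: pvInner d r0
        = (pvLookup d tok ++ ['\n']) ++ pvInner d r0 := by simp
    rw [e2, join_head_append]
    simp

lemma acore_dot (d : List (String × String)) (tok rest : List Char)
    (h1 : ¬ ['.', ' '] <:+: tok) (h2 : '\n' ∉ tok) :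
    pvACore d (tok ++ '.' :: ' ' :: rest) = pvLookup d tok ++ '.' :: ' ' :: pvACore d rest := by
  unfold pvACore
  rw [splitOn_dot tok rest h1]
  rcases hr : PySem.Chars.splitOn rest ['.', ' '] with _ | ⟨r0, rs⟩
  · exact absurd hr (splitOn_ne_nil _ _)
  · simp only [List.map_cons]
    rw [PySem.Chars.join_cons_cons, inner_tok d tok h2]
    simp

-- unfolding equations of pvScan
lemma scan_nil (d : List (String × String)) (tok : List Char) :
    pvScan d [] tok = pvLookup d tok := by
  rw [pvScan]

lemma scan_cons (d : List (String × String)) (c : Char) (rest tok : List Char) :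
    pvScan d (c :: rest) tok =
      if c = '\n' then pvLookup d tok ++ '\n' :: pvScan d rest []
      else if c = '.' ∧ rest.head? = some ' ' then
        pvLookup d tok ++ '.' :: ' ' :: pvScan d rest.tail []
      else pvScan d rest (tok ++ [c]) := by
  rw [pvScan]

-- ---- main invariant: the scan of B computes A's split/join value ----

lemma main_aux (d : List (String × String)) :
    ∀ (n : Nat) (cs tok : List Char), cs.length ≤ n →
      ¬ ['.', ' '] <:+: tok → '\n' ∉ tok →
      (tok.getLast? = some '.' → cs.head? ≠ some ' ') →
      pvACore d (tok ++ cs) = pvScan d cs tok := by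
  intro n
  induction n with
  | zero =>
    intro cs tok hlen h1 h2 _
    have hcs : cs = [] := List.eq_nil_of_length_eq_zero (by omega)
    subst hcs
    rw [List.append_nil, acore_tok d tok h1 h2, scan_nil]
  | succ m ih =>
    intro cs tok hlen h1 h2 hb
    cases cs with
    | nil => rw [List.append_nil, acore_tok d tok h1 h2, scan_nil]
    | cons c rest =>
      by_cases hc : c = '\n'
      · subst hc
        rw [scan_cons, if_pos rfl, acore_nl d tok rest h1 h2,
            show pvACore d rest = pvScan d rest [] from by
              simpa using ih rest [] (by simp at hlen; omega) (by simp) (by simp) (by simp)]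
      · by_cases hdot : c = '.' ∧ rest.head? = some ' '
        · obtain ⟨hc', hh⟩ := hdot
          subst hc'
          cases rest with
          | nil => simp at hh
          | cons e rest' =>
            have he : e = ' ' := by simpa using hh
            subst he
            rw [scan_cons, if_neg hc, if_pos ⟨rfl, by simp⟩]
            simp only [List.tail_cons]
            rw [acore_dot d tok rest' h1 h2,
                show pvACore d rest' = pvScan d rest' [] from by
                  simpa using ih rest' [] (by simp at hlen; omega) (by simp) (by simp) (by simp)]
        · rw [scan_cons, if_neg hc, if_neg hdot]
          have hrw : tok ++ c :: rest = (tok ++ [c]) ++ rest := by simp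
          rw [hrw]
          apply ih rest (tok ++ [c]) (by simp at hlen; omega)
          · intro hin
            rcases infix_concat_two hin with h' | ⟨hl, he⟩
            · exact h1 h'
            · exact (hb hl) (by simp [he])
          · simp only [List.mem_append, List.mem_singleton]
            rintro (hm | he)
            · exact h2 hm
            · exact hc he.symm
          · intro hl
            rw [List.getLast?_concat] at hl
            intro hh
            exact hdot ⟨Option.some.inj hl, hh⟩

lemma core_eq (d : List (String × String)) (cs : List Char) :
    pvACore d cs = pvScan d cs [] := by
  have := main_aux d cs.length cs [] le_rfl (by simp) (by simp) (by simp)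
  simpa using this

-- ===== VERDICT (by name: the statement is the Claim_ definition above) =====
theorem get_paraphase_whole_spec : Claim_equal_get_paraphase_whole := by
  intro paragraph real2para _ _
  unfold Spec_get_paraphase_whole get_paraphase_whole get_paraphase_whole_alt
  exact congrArg String.ofList (core_eq real2para _)
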